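-- pv_equiv track=rewrite | github.com/vilhelm-k/credit-risk-xai-thesis | credit_risk_xai/config.py | get_ale_filename
-- ===== SOURCE A (Python) =====
-- FEATURE_NAME_MAP = {
--     # Base Features (3)
--     'company_age': 'Company Age',
--     'sni_group_3digit': 'Industry (SNI)',
--     'ser_laen': 'County',
--     # Nyckeltal Ratios (10)
--     'ny_foradlvpanst': 'Value Added per Employee',
--     'ny_kapomsh': 'Capital Turnover',
--     'ny_rs': 'Interest Rate on Debt',
--     'ny_skuldgrd': 'Debt Ratio',
--     'ny_solid': 'Equity Ratio',
--     'ny_avkegkap': 'Return on Equity',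
--     'ny_kasslikv': 'Quick Ratio',
--     'ny_nettomarg': 'Net Profit Margin',
--     'ny_omspanst': 'Revenue per Employee',
--     'ny_omsf': 'Revenue Growth (YoY)',
--     # Log-Transformed Nominal Features (2)
--     'log_br07b_kabasu': 'Log Cash & Bank',
--     'log_br10_eksu': 'Log Total Equity',
--     # Engineered Ratio Features (5)
--     'ratio_depreciation_cost': 'Depreciation Intensity',
--     'ratio_cash_interest_cov': 'Cash Interest Coverage',
--     'ratio_cash_liquidity': 'Cash Ratio',
--     'ratio_retained_earnings_equity': 'Retained Earnings / Equity',
--     'dividend_yield': 'Dividend Payer',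
--     # Working Capital Efficiency (2)
--     'dso_days': 'Days Sales Outstanding',
--     'dpo_days': 'Days Payables Outstanding',
--     # Year-over-Year Trends (3)
--     'ny_solid_yoy_diff': 'Equity Ratio Δ (YoY)',
--     'ratio_cash_liquidity_yoy_abs': 'Cash Ratio Δ (YoY)',
--     'inventory_days_yoy_diff': 'Inventory Days Δ (YoY)',
--     # Multi-Year Temporal Features (3)
--     'revenue_cagr_3y': 'Revenue CAGR (3Y)',
--     'profit_cagr_3y': 'Profit CAGR (3Y)',
--     'revenue_drawdown_5y': 'Revenue Drawdown (5Y)',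
--     # Macroeconomic Conditions (1)
--     'term_spread': 'Term Spread',
-- }
--
-- FEATURE_NAME_MAP_V2 = {
--     # Base Features (3)
--     'company_age': 'Company Age',
--     'sni_group_3digit': 'Industry (SNI)',
--     # Nyckeltal Ratios - Kept (7)
--     'ny_kapomsh': 'Total Asset Turnover',  # Renamed: Altman X5
--     'ny_skuldgrd': 'Debt Ratio',           # Ohlson TL/TA
--     'ny_solid': 'Equity Ratio',
--     'ny_avkegkap': 'Return on Equity',
--     'ny_kasslikv': 'Quick Ratio',
--     'ny_nettomarg': 'Net Profit Margin',
--     'ny_omsf': 'Revenue Growth (YoY)',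
--     # Log-Transformed Size (1)
--     'log_total_assets': 'Log Total Assets',  # Ohlson Size (W)
--     # Altman/Ohlson Aligned Ratios (5)
--     'working_capital_ta': 'Working Capital / TA',      # Altman X1
--     'retained_earnings_ta': 'Retained Earnings / TA',  # Altman X2
--     'interest_coverage': 'Interest Coverage',          # EBIT / Interest
--     'ratio_cash_liquidity': 'Cash Ratio',
--     'gross_margin': 'Gross Margin',
--     'dividend_yield': 'Dividend Payer',
--     # Working Capital Efficiency (2)
--     'dso_days': 'Days Sales Outstanding',
--     'dpo_days': 'Days Payables Outstanding',
--     # Temporal Features (3)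
--     'revenue_cagr_3y': 'Revenue CAGR (3Y)',
--     'revenue_drawdown_5y': 'Revenue Drawdown (5Y)',
--     'ebitda_volatility': 'EBITDA Volatility (3Y)',
--     # Macroeconomic Conditions (1)
--     'term_spread': 'Term Spread',
-- }
--
-- ACTIVE_MODEL_VERSION = "v2"  # Change this to "v2" to use migrated features
--
-- def get_active_feature_name_map():
--     """Get the feature name map for the active model version."""
--     if ACTIVE_MODEL_VERSION == "v2":
--         return FEATURE_NAME_MAP_V2
--     return FEATURE_NAME_MAP
--
-- def get_display_name(feature: str) -> str:
--     """Get human-readable display name for a feature."""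
--     name_map = get_active_feature_name_map()
--     return name_map.get(feature, feature)
--
-- def get_ale_filename(feature: str) -> str:
--     """Auto-generate ALE plot filename from feature name."""
--     display_name = get_display_name(feature)
--     # Convert to lowercase, replace spaces/special chars with underscores
--     clean_name = display_name.lower()
--     clean_name = clean_name.replace(' ', '_').replace('/', '_').replace('(', '').replace(')', '')
--     clean_name = clean_name.replace('δ', 'delta').replace('%', 'pct')
--     # Remove consecutive underscores
--     while '__' in clean_name:
--         clean_name = clean_name.replace('__', '_')
--     return f"ale_{clean_name}.pdf"
-- ===== SOURCE B (Python) =====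
-- FEATURE_NAME_MAP = {
--     'company_age': 'Company Age',
--     'sni_group_3digit': 'Industry (SNI)',
--     'ser_laen': 'County',
--     'ny_foradlvpanst': 'Value Added per Employee',
--     'ny_kapomsh': 'Capital Turnover',
--     'ny_rs': 'Interest Rate on Debt',
--     'ny_skuldgrd': 'Debt Ratio',
--     'ny_solid': 'Equity Ratio',
--     'ny_avkegkap': 'Return on Equity',
--     'ny_kasslikv': 'Quick Ratio',
--     'ny_nettomarg': 'Net Profit Margin',
--     'ny_omspanst': 'Revenue per Employee',
--     'ny_omsf': 'Revenue Growth (YoY)',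
--     'log_br07b_kabasu': 'Log Cash & Bank',
--     'log_br10_eksu': 'Log Total Equity',
--     'ratio_depreciation_cost': 'Depreciation Intensity',
--     'ratio_cash_interest_cov': 'Cash Interest Coverage',
--     'ratio_cash_liquidity': 'Cash Ratio',
--     'ratio_retained_earnings_equity': 'Retained Earnings / Equity',
--     'dividend_yield': 'Dividend Payer',
--     'dso_days': 'Days Sales Outstanding',
--     'dpo_days': 'Days Payables Outstanding',
--     'ny_solid_yoy_diff': 'Equity Ratio Δ (YoY)',
--     'ratio_cash_liquidity_yoy_abs': 'Cash Ratio Δ (YoY)',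
--     'inventory_days_yoy_diff': 'Inventory Days Δ (YoY)',
--     'revenue_cagr_3y': 'Revenue CAGR (3Y)',
--     'profit_cagr_3y': 'Profit CAGR (3Y)',
--     'revenue_drawdown_5y': 'Revenue Drawdown (5Y)',
--     'term_spread': 'Term Spread',
-- }
--
-- FEATURE_NAME_MAP_V2 = {
--     'company_age': 'Company Age',
--     'sni_group_3digit': 'Industry (SNI)',
--     'ny_kapomsh': 'Total Asset Turnover',
--     'ny_skuldgrd': 'Debt Ratio',
--     'ny_solid': 'Equity Ratio',
--     'ny_avkegkap': 'Return on Equity',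
--     'ny_kasslikv': 'Quick Ratio',
--     'ny_nettomarg': 'Net Profit Margin',
--     'ny_omsf': 'Revenue Growth (YoY)',
--     'log_total_assets': 'Log Total Assets',
--     'working_capital_ta': 'Working Capital / TA',
--     'retained_earnings_ta': 'Retained Earnings / TA',
--     'interest_coverage': 'Interest Coverage',
--     'ratio_cash_liquidity': 'Cash Ratio',
--     'gross_margin': 'Gross Margin',
--     'dividend_yield': 'Dividend Payer',
--     'dso_days': 'Days Sales Outstanding',
--     'dpo_days': 'Days Payables Outstanding',
--     'revenue_cagr_3y': 'Revenue CAGR (3Y)',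
--     'revenue_drawdown_5y': 'Revenue Drawdown (5Y)',
--     'ebitda_volatility': 'EBITDA Volatility (3Y)',
--     'term_spread': 'Term Spread',
-- }
--
-- ACTIVE_MODEL_VERSION = "v2"
--
--
-- def _char_map(ch):
--     """Mapping of one lowercased character of the display name."""
--     if ch == ' ' or ch == '/':
--         return '_'
--     if ch == '(' or ch == ')':
--         return ''
--     if ch == '\u03b4':  # 'δ'
--         return 'delta'
--     if ch == '%':
--         return 'pct'
--     return ch
--
--
-- def get_ale_filename(feature: str) -> str:
--     """Auto-generate ALE plot filename from feature name (single-pass version)."""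
--     name_map = FEATURE_NAME_MAP_V2 if ACTIVE_MODEL_VERSION == "v2" else FEATURE_NAME_MAP
--     display_name = name_map.get(feature, feature)
--     out = []
--     for ch in display_name.lower():
--         for c in _char_map(ch):
--             if c == '_' and out and out[-1] == '_':
--                 continue
--             out.append(c)
--     return "ale_" + "".join(out) + ".pdf"
-- ===== Notes on version B (the rewrite author's own statement) =====
-- stated objective: simpler
-- what changed: Replaces the six whole-string .replace passes plus the underscore-run-collapsing fixpoint while-loop by one stateful pass over the lowercased display name that maps each character and skips a new underscore whenever the last emitted character is already an underscore.
import Mathlib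
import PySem

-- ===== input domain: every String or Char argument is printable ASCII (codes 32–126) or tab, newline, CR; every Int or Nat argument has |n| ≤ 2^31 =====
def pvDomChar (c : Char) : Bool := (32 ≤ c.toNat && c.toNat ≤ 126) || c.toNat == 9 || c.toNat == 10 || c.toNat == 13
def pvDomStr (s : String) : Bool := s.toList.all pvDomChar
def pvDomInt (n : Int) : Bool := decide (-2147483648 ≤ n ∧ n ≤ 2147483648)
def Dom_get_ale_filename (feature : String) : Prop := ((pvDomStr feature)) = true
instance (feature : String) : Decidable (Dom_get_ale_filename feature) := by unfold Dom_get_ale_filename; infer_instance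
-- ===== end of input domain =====

-- B replaces A's six whole-string .replace passes plus the '__'-collapsing fixpoint while-loop
-- by one stateful pass over the lowercased display name (objective: simpler decomposition).

-- ===== PORT A =====
def FEATURE_NAME_MAP : PySem.Dict String String := PySem.Dict.ofList [
  ("company_age", "Company Age"),
  ("sni_group_3digit", "Industry (SNI)"),
  ("ser_laen", "County"),
  ("ny_foradlvpanst", "Value Added per Employee"),
  ("ny_kapomsh", "Capital Turnover"),
  ("ny_rs", "Interest Rate on Debt"),
  ("ny_skuldgrd", "Debt Ratio"),
  ("ny_solid", "Equity Ratio"),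
  ("ny_avkegkap", "Return on Equity"),
  ("ny_kasslikv", "Quick Ratio"),
  ("ny_nettomarg", "Net Profit Margin"),
  ("ny_omspanst", "Revenue per Employee"),
  ("ny_omsf", "Revenue Growth (YoY)"),
  ("log_br07b_kabasu", "Log Cash & Bank"),
  ("log_br10_eksu", "Log Total Equity"),
  ("ratio_depreciation_cost", "Depreciation Intensity"),
  ("ratio_cash_interest_cov", "Cash Interest Coverage"),
  ("ratio_cash_liquidity", "Cash Ratio"),
  ("ratio_retained_earnings_equity", "Retained Earnings / Equity"),
  ("dividend_yield", "Dividend Payer"),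
  ("dso_days", "Days Sales Outstanding"),
  ("dpo_days", "Days Payables Outstanding"),
  ("ny_solid_yoy_diff", "Equity Ratio Δ (YoY)"),
  ("ratio_cash_liquidity_yoy_abs", "Cash Ratio Δ (YoY)"),
  ("inventory_days_yoy_diff", "Inventory Days Δ (YoY)"),
  ("revenue_cagr_3y", "Revenue CAGR (3Y)"),
  ("profit_cagr_3y", "Profit CAGR (3Y)"),
  ("revenue_drawdown_5y", "Revenue Drawdown (5Y)"),
  ("term_spread", "Term Spread")]

def FEATURE_NAME_MAP_V2 : PySem.Dict String String := PySem.Dict.ofList [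
  ("company_age", "Company Age"),
  ("sni_group_3digit", "Industry (SNI)"),
  ("ny_kapomsh", "Total Asset Turnover"),
  ("ny_skuldgrd", "Debt Ratio"),
  ("ny_solid", "Equity Ratio"),
  ("ny_avkegkap", "Return on Equity"),
  ("ny_kasslikv", "Quick Ratio"),
  ("ny_nettomarg", "Net Profit Margin"),
  ("ny_omsf", "Revenue Growth (YoY)"),
  ("log_total_assets", "Log Total Assets"),
  ("working_capital_ta", "Working Capital / TA"),
  ("retained_earnings_ta", "Retained Earnings / TA"),
  ("interest_coverage", "Interest Coverage"),
  ("ratio_cash_liquidity", "Cash Ratio"),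
  ("gross_margin", "Gross Margin"),
  ("dividend_yield", "Dividend Payer"),
  ("dso_days", "Days Sales Outstanding"),
  ("dpo_days", "Days Payables Outstanding"),
  ("revenue_cagr_3y", "Revenue CAGR (3Y)"),
  ("revenue_drawdown_5y", "Revenue Drawdown (5Y)"),
  ("ebitda_volatility", "EBITDA Volatility (3Y)"),
  ("term_spread", "Term Spread")]

def ACTIVE_MODEL_VERSION : String := "v2"

def get_active_feature_name_map : PySem.Dict String String :=
  if ACTIVE_MODEL_VERSION == "v2" then FEATURE_NAME_MAP_V2 else FEATURE_NAME_MAP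

def get_display_name (feature : String) : String :=
  PySem.Dict.getD get_active_feature_name_map feature feature

-- what Python's clean.replace('__', '_') computes (one full non-overlapping left-to-right pass);
-- needed by name in collapseA's termination proof, so it lives above the port
def pyrep : List Char → List Char
  | [] => []
  | [c] => [c]
  | c :: d :: t => if c = '_' ∧ d = '_' then '_' :: pyrep t else c :: pyrep (d :: t)

-- '__' occurs as a substring (two adjacent underscores)
def hasDD : List Char → Bool
  | [] => false
  | [_] => false
  | c :: d :: t => (decide (c = '_' ∧ d = '_')) || hasDD (d :: t)

theorem go_dd : ∀ (fuel : Nat) (l acc : List Char), l.length ≤ fuel →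
    PySem.Chars.replace.go ['_','_'] ['_'] fuel l acc = acc.reverse ++ pyrep l := by
  intro fuel
  induction fuel with
  | zero =>
    intro l acc h
    have : l = [] := List.eq_nil_of_length_eq_zero (Nat.le_zero.mp h)
    subst this; simp [PySem.Chars.replace.go, pyrep]
  | succ n ih =>
    intro l acc h
    match l with
    | [] => simp [PySem.Chars.replace.go, pyrep]
    | [c] =>
      simp only [PySem.Chars.replace.go]
      rw [if_neg (by simp [List.isPrefixOf])]
      rw [ih [] (c :: acc) (by simp)]
      simp [pyrep]
    | c :: d :: t =>
      simp only [PySem.Chars.replace.go]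
      by_cases hc : c = '_' ∧ d = '_'
      · obtain ⟨rfl, rfl⟩ := hc
        rw [if_pos (by simp [List.isPrefixOf])]
        simp only [List.singleton_append, List.length_cons, List.drop_succ_cons,
          List.length_nil, List.drop_zero, List.reverse_cons, List.reverse_nil, List.nil_append]
        rw [ih t ('_' :: acc) (by simp at h ⊢; omega)]
        simp [pyrep]
      · rw [if_neg (by simp [List.isPrefixOf]; tauto)]
        rw [ih (d :: t) (c :: acc) (by simp at h ⊢; omega)]
        simp [pyrep, hc]

theorem replace_dd (l : List Char) : PySem.Chars.replace l ['_','_'] ['_'] = pyrep l := by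
  rw [PySem.Chars.replace, if_neg (by simp), go_dd l.length l [] le_rfl]
  simp

theorem pyrep_length_le (l : List Char) : (pyrep l).length ≤ l.length := by
  induction l using pyrep.induct with
  | case1 => simp [pyrep]
  | case2 c => simp [pyrep]
  | case3 c d t h ih => simp only [pyrep, if_pos h]; simp at ih ⊢; omega
  | case4 c d t h ih => simp only [pyrep, if_neg h]; simp at ih ⊢; omega

theorem pyrep_length_lt (l : List Char) (h : hasDD l = true) : (pyrep l).length < l.length := by
  induction l using pyrep.induct with
  | case1 => simp [hasDD] at h
  | case2 c => simp [hasDD] at h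
  | case3 c d t hdd ih =>
    have := pyrep_length_le t
    simp only [pyrep, if_pos hdd]; simp at this ⊢; omega
  | case4 c d t hdd ih =>
    simp only [hasDD] at h
    rcases Bool.or_eq_true_iff.mp h with h' | h'
    · exact absurd (of_decide_eq_true h') hdd
    · have := ih h'
      simp only [pyrep, if_neg hdd]; simp at this ⊢; omega

theorem hasDD_iff (l : List Char) : hasDD l = true ↔ ['_','_'] <:+: l := by
  induction l with
  | nil => simp [hasDD]
  | cons c t ih =>
    match t with
    | [] =>
      simp only [hasDD, List.infix_cons_iff]
      constructor
      · intro h; cases h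
      · rintro (h | h)
        · rcases h with ⟨r, hr⟩; simp at hr
        · rcases h with ⟨p, s, hp⟩; simp at hp
    | d :: t' =>
      simp only [hasDD, Bool.or_eq_true_iff, decide_eq_true_eq, List.infix_cons_iff (l₂ := d :: t')]
      rw [ih]
      constructor
      · rintro (⟨rfl, rfl⟩ | h)
        · exact Or.inl ⟨t', rfl⟩
        · exact Or.inr h
      · rintro (h | h)
        · rcases List.cons_prefix_cons.mp h with ⟨rfl, h2⟩
          rcases List.cons_prefix_cons.mp h2 with ⟨rfl, _⟩
          exact Or.inl ⟨rfl, rfl⟩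
        · exact Or.inr h

theorem replace_dd_shrinks (s : String) (h : PySem.Str.isIn "__" s = true) :
    (PySem.Str.replace s "__" "_").toList.length < s.toList.length := by
  have h' : PySem.Chars.isIn ['_','_'] s.toList = true := by
    simpa using h
  have hinf : ['_','_'] <:+: s.toList := (PySem.Chars.isIn_iff_infix _ _).mp h'
  have : (PySem.Str.replace s "__" "_").toList = pyrep s.toList := by
    rw [PySem.Str.toList_replace]
    show PySem.Chars.replace s.toList ['_','_'] ['_'] = _
    exact replace_dd _
  rw [this]
  exact pyrep_length_lt _ ((hasDD_iff _).mpr hinf)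

-- the 'while "__" in clean_name' loop of A
def collapseA (s : String) : String :=
  if h : PySem.Str.isIn "__" s = true then collapseA (PySem.Str.replace s "__" "_") else s
termination_by s.toList.length
decreasing_by exact replace_dd_shrinks s h

def get_ale_filename (feature : String) : String :=
  let display_name := get_display_name feature
  let clean0 := PySem.Str.lower display_name
  let clean1 := PySem.Str.replace (PySem.Str.replace (PySem.Str.replace (PySem.Str.replace clean0 " " "_") "/" "_") "(" "") ")" ""
  let clean2 := PySem.Str.replace (PySem.Str.replace clean1 "δ" "delta") "%" "pct"
  let clean3 := collapseA clean2
  "ale_" ++ clean3 ++ ".pdf"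

-- ===== PORT B =====
-- mapping of one lowercased character (Source B's _char_map)
def bmap (c : Char) : List Char :=
  if c = ' ' ∨ c = '/' then ['_']
  else if c = '(' ∨ c = ')' then []
  else if c = 'δ' then ['d','e','l','t','a']
  else if c = '%' then ['p','c','t']
  else [c]

-- appending one mapped character with the skip rule ('continue' when a '_' follows a '_')
def bstep (out : List Char) (c : Char) : List Char :=
  if c = '_' ∧ out.getLast? = some '_' then out else out ++ [c]

def get_ale_filename_alt (feature : String) : String :=
  let name_map := if ACTIVE_MODEL_VERSION == "v2" then FEATURE_NAME_MAP_V2 else FEATURE_NAME_MAP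
  let display_name := PySem.Dict.getD name_map feature feature
  let out := (PySem.Str.lower display_name).toList.foldl (fun out ch => (bmap ch).foldl bstep out) []
  "ale_" ++ String.ofList out ++ ".pdf"

-- ===== PRECONDITION & SPEC =====
def Spec_get_ale_filename (feature : String) (out : String) : Prop := out = get_ale_filename_alt feature
instance (feature : String) (out : String) : Decidable (Spec_get_ale_filename feature out) := by unfold Spec_get_ale_filename; infer_instance

-- ===== CLAIM (what is proved, stated in full; the proofs are below) =====
def Claim_equal_get_ale_filename : Prop := ∀ (feature : String), Dom_get_ale_filename feature → Spec_get_ale_filename feature (get_ale_filename feature)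

-- ===== LEMMAS AND PROOFS =====

theorem go_single (c : Char) (new : List Char) : ∀ (fuel : Nat) (l acc : List Char), l.length ≤ fuel →
    PySem.Chars.replace.go [c] new fuel l acc
      = acc.reverse ++ l.flatMap (fun x => if x = c then new else [x]) := by
  intro fuel
  induction fuel with
  | zero =>
    intro l acc h
    have : l = [] := List.eq_nil_of_length_eq_zero (Nat.le_zero.mp h)
    subst this; simp [PySem.Chars.replace.go]
  | succ n ih =>
    intro l acc h
    match l with
    | [] => simp [PySem.Chars.replace.go]
    | x :: t =>
      simp only [PySem.Chars.replace.go]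
      by_cases hx : x = c
      · subst hx
        rw [if_pos (by simp [List.isPrefixOf])]
        simp only [List.length_cons, List.drop_succ_cons, List.length_nil, List.drop_zero]
        rw [ih t (new.reverse ++ acc) (by simp at h ⊢; omega)]
        simp
      · rw [if_neg (by simp [List.isPrefixOf]; exact fun h' => hx h'.symm)]
        rw [ih t (x :: acc) (by simp at h ⊢; omega)]
        simp [hx]

theorem replace_single (l : List Char) (c : Char) (new : List Char) :
    PySem.Chars.replace l [c] new = l.flatMap (fun x => if x = c then new else [x]) := by
  rw [PySem.Chars.replace, if_neg (by simp), go_single c new l.length l [] le_rfl]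
  simp

-- squeezing runs of '_' down to one, with the last emitted character as state
def sqAux : Option Char → List Char → List Char
  | _, [] => []
  | last, c :: t => if c = '_' ∧ last = some '_' then sqAux last t else c :: sqAux (some c) t

theorem sqAux_cons (last : Option Char) (c : Char) (t : List Char) :
    sqAux last (c :: t) = if c = '_' ∧ last = some '_' then sqAux last t else c :: sqAux (some c) t := rfl

theorem sqAux_pyrep (l : List Char) : ∀ last, sqAux last (pyrep l) = sqAux last l := by
  induction l using pyrep.induct with
  | case1 => intro last; rfl
  | case2 c => intro last; rfl
  | case3 c d t h ih =>
    obtain ⟨rfl, rfl⟩ := h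
    intro last
    have hp : pyrep ('_' :: '_' :: t) = '_' :: pyrep t := by simp [pyrep]
    rw [hp]
    by_cases hl : last = some '_'
    · simp [sqAux_cons, hl, ih]
    · simp [sqAux_cons, hl, ih]
  | case4 c d t h ih =>
    intro last
    have hp : pyrep (c :: d :: t) = c :: pyrep (d :: t) := by
      match t with
      | [] => simp [pyrep, h]
      | _ :: _ => simp [pyrep, h]
    rw [hp, sqAux_cons, sqAux_cons]
    by_cases hc : c = '_' ∧ last = some '_'
    · rw [if_pos hc, if_pos hc, ih]
    · rw [if_neg hc, if_neg hc, ih]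

theorem sqAux_of_noDD (l : List Char) : ∀ last, hasDD l = false →
    (last = some '_' → l.head? ≠ some '_') → sqAux last l = l := by
  induction l with
  | nil => intro last _ _; rfl
  | cons c t ih =>
    intro last h1 h2
    have hskip : ¬ (c = '_' ∧ last = some '_') := by
      rintro ⟨rfl, hl⟩; exact h2 hl rfl
    rw [sqAux, if_neg hskip]
    congr 1
    apply ih
    · match t with
      | [] => rfl
      | d :: t' =>
        simp only [hasDD, Bool.or_eq_false_iff] at h1
        exact h1.2
    · intro hc hh
      match t with
      | [] => simp at hh
      | d :: t' =>
        simp only [hasDD, Bool.or_eq_false_iff, decide_eq_false_iff_not] at h1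
        simp only [List.head?_cons, Option.some.injEq] at hh
        exact h1.1 ⟨Option.some.inj hc, hh⟩

theorem collapseA_toList (s : String) : (collapseA s).toList = sqAux none s.toList := by
  induction s using collapseA.induct with
  | case1 s h ih =>
    rw [collapseA, dif_pos h]
    rw [ih]
    have : (PySem.Str.replace s "__" "_").toList = pyrep s.toList := by
      rw [PySem.Str.toList_replace]
      show PySem.Chars.replace s.toList ['_','_'] ['_'] = _
      exact replace_dd _
    rw [this, sqAux_pyrep]
  | case2 s h =>
    rw [collapseA, dif_neg h]
    have h' : PySem.Chars.isIn ['_','_'] s.toList = false := by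
      simpa using (Bool.not_eq_true _).mp h
    have hdd : hasDD s.toList = false := by
      rw [← Bool.not_eq_true, hasDD_iff]
      exact (PySem.Chars.isIn_eq_false_iff _ _).mp h'
    exact (sqAux_of_noDD s.toList none hdd (by simp)).symm

theorem foldl_bstep (l : List Char) : ∀ out, l.foldl bstep out = out ++ sqAux out.getLast? l := by
  induction l with
  | nil => intro out; simp [sqAux]
  | cons c t ih =>
    intro out
    by_cases h : c = '_' ∧ out.getLast? = some '_'
    · rw [List.foldl_cons, bstep, if_pos h, ih out, sqAux, if_pos h]
    · rw [List.foldl_cons, bstep, if_neg h, ih (out ++ [c]), sqAux, if_neg h]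
      simp

theorem foldl_flatMap' {α β : Type} (g : β → List α) (f : List Char → α → List Char) :
    ∀ (l : List β) (acc : List Char),
      (l.flatMap g).foldl f acc = l.foldl (fun a x => (g x).foldl f a) acc := by
  intro l
  induction l with
  | nil => intro acc; simp
  | cons x t ih => intro acc; simp [List.flatMap_cons, List.foldl_append, ih]

theorem bmap_eq (c : Char) :
    List.flatMap (fun x2 =>
      List.flatMap (fun x3 =>
        List.flatMap (fun x4 =>
          List.flatMap (fun x5 =>
            List.flatMap (fun x6 => if x6 = '%' then ['p','c','t'] else [x6])
              (if x5 = 'δ' then ['d','e','l','t','a'] else [x5]))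
            (if x4 = ')' then [] else [x4]))
          (if x3 = '(' then [] else [x3]))
        (if x2 = '/' then ['_'] else [x2]))
      (if c = ' ' then ['_'] else [c]) = bmap c := by
  by_cases h1 : c = ' '
  · subst h1; decide
  by_cases h2 : c = '/'
  · subst h2; decide
  by_cases h3 : c = '('
  · subst h3; decide
  by_cases h4 : c = ')'
  · subst h4; decide
  by_cases h5 : c = 'δ'
  · subst h5; decide
  by_cases h6 : c = '%'
  · subst h6; decide
  simp [bmap, h1, h2, h3, h4, h5, h6]

theorem chain_eq (l : List Char) :
    PySem.Chars.replace (PySem.Chars.replace (PySem.Chars.replace (PySem.Chars.replace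
      (PySem.Chars.replace (PySem.Chars.replace l [' '] ['_']) ['/'] ['_']) ['('] []) [')'] [])
      ['δ'] ['d','e','l','t','a']) ['%'] ['p','c','t'] = l.flatMap bmap := by
  simp only [replace_single, List.flatMap_assoc]
  have hfun : (fun c =>
      List.flatMap (fun x2 =>
        List.flatMap (fun x3 =>
          List.flatMap (fun x4 =>
            List.flatMap (fun x5 =>
              List.flatMap (fun x6 => if x6 = '%' then ['p','c','t'] else [x6])
                (if x5 = 'δ' then ['d','e','l','t','a'] else [x5]))
              (if x4 = ')' then [] else [x4]))
            (if x3 = '(' then [] else [x3]))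
          (if x2 = '/' then ['_'] else [x2]))
        (if c = ' ' then ['_'] else [c])) = bmap := funext bmap_eq
  rw [hfun]

theorem tail_eq (display : String) :
    collapseA (PySem.Str.replace (PySem.Str.replace (PySem.Str.replace (PySem.Str.replace
        (PySem.Str.replace (PySem.Str.replace (PySem.Str.lower display) " " "_") "/" "_") "(" "") ")" "")
        "δ" "delta") "%" "pct")
      = String.ofList ((PySem.Str.lower display).toList.foldl (fun out ch => (bmap ch).foldl bstep out) []) := by
  have hchain :
      (PySem.Str.replace (PySem.Str.replace (PySem.Str.replace (PySem.Str.replace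
        (PySem.Str.replace (PySem.Str.replace (PySem.Str.lower display) " " "_") "/" "_") "(" "") ")" "")
        "δ" "delta") "%" "pct").toList = (PySem.Str.lower display).toList.flatMap bmap := by
    simp only [PySem.Str.toList_replace]
    exact chain_eq _
  refine Eq.trans String.ofList_toList.symm ?_
  rw [collapseA_toList, hchain]
  refine congrArg String.ofList ?_
  rw [← foldl_flatMap' bmap bstep, foldl_bstep]
  simp

-- ===== VERDICT (by name: the statement is the Claim_ definition above) =====
theorem get_ale_filename_spec : Claim_equal_get_ale_filename := by
  intro feature _
  show get_ale_filename feature = get_ale_filename_alt feature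
  simp only [get_ale_filename, get_ale_filename_alt, get_display_name, get_active_feature_name_map]
  rw [tail_eq]
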